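-- pv_equiv track=rewrite | github.com/DaiSugi01/Competitive | python/Interviewing/Yelp/tak1.py | find_last_dest
-- ===== SOURCE A (Python) =====
-- from collections import defaultdict
-- from typing import List
--
-- def find_last_dest(original_click, start):
--     # make a map -> {origin: [dest]} --> {"Home": ["Home Cleaning"]}
--     # deep first search
--     if not start or not original_click:
--         return None
--
--     # O(N)
--     adj_list = defaultdict(list)
--     for click in original_click:
--         origin, dest = click[0], click[1]
--         adj_list[origin].append(dest)
--
--     # O(N)
--     def dfs(origin: str, adj_list: List[str]):
--         if origin not in adj_list:
--             return origin
--
--         if origin in adj_list and not adj_list[origin]: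
--             return origin
--
--         return dfs(adj_list[origin].pop(), adj_list)
--
--     return dfs(start, adj_list)
-- ===== SOURCE B (Python) =====
-- def find_last_dest(original_click, start):
--     if not start or not original_click:
--         return None
--
--     # immutable adjacency map: origin -> list of dests in input order
--     adj = {}
--     for click in original_click:
--         adj.setdefault(click[0], []).append(click[1])
--
--     # remaining-count table instead of destructive pops
--     remaining = {origin: len(dests) for origin, dests in adj.items()}
--
--     node = start
--     while node in remaining and remaining[node] > 0:
--         k = remaining[node] - 1
--         remaining[node] = k
--         node = adj[node][k]
--     return node
-- ===== Notes on version B (the rewrite author's own statement) =====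
-- stated objective: alternative
-- what changed: Replaced the recursive dfs that destructively pops from the adjacency lists with an iterative walk over an immutable adjacency map plus a remaining-count table (the pop becomes index arithmetic on a counter), which also avoids Python's recursion depth limit on long chains.
import Mathlib
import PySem

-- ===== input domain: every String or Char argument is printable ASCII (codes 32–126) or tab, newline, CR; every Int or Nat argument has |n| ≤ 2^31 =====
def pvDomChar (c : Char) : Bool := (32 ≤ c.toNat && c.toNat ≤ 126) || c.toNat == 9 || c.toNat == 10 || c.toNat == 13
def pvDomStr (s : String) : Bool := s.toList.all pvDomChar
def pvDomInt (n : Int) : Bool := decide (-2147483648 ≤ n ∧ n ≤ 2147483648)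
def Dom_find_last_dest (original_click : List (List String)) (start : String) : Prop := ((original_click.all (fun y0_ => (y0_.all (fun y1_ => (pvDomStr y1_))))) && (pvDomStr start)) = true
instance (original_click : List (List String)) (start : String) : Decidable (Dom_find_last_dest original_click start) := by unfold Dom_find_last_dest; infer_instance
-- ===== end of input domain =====

-- B replaces A's recursive dfs with destructive pops by an iterative walk over an
-- immutable adjacency map plus a remaining-count table (objective: alternative).

-- ===== PORT A =====
-- adj_list = defaultdict(list); for click: adj_list[click[0]].append(click[1])
def pvBuildAdjA (original_click : List (List String)) : PySem.Dict String (List String) :=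
  original_click.foldl
    (fun d click =>
      d.modify (PySem.List.pyGetD click 0 "") [] (fun l => l ++ [PySem.List.pyGetD click 1 ""]))
    PySem.Dict.empty

-- the recursive dfs; fuel (original_click.length + 1) only makes the recursion
-- structurally total — each call pops one dest, so it is never exhausted
def pvDfsA : Nat → PySem.Dict String (List String) → String → String
  | 0, _, origin => origin
  | fuel+1, adj, origin =>
    if adj.contains origin = false then origin
    else if adj.contains origin = true && (adj.getD origin []).isEmpty then origin
    else
      match PySem.List.pop? (adj.getD origin []) with
      | none => origin          -- unreachable: the list is non-empty here
      | some (x, rest) => pvDfsA fuel (adj.insert origin rest) x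

def find_last_dest (original_click : List (List String)) (start : String) : Option String :=
  if start = "" ∨ original_click = [] then none
  else some (pvDfsA (original_click.length + 1) (pvBuildAdjA original_click) start)

-- ===== PORT B =====
-- adj = {}; for click: adj.setdefault(click[0], []).append(click[1])
def pvAdjB (original_click : List (List String)) : PySem.Dict String (List String) :=
  original_click.foldl
    (fun d click =>
      d.insert (PySem.List.pyGetD click 0 "")
        (d.getD (PySem.List.pyGetD click 0 "") [] ++ [PySem.List.pyGetD click 1 ""]))
    PySem.Dict.empty

-- remaining = {origin: len(dests) for origin, dests in adj.items()}
def pvCntB (adj : PySem.Dict String (List String)) : PySem.Dict String Int :=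
  adj.items.foldl (fun d p => d.insert p.1 (p.2.length : Int)) PySem.Dict.empty

-- while node in remaining and remaining[node] > 0: k = remaining[node]-1; remaining[node] = k; node = adj[node][k]
def pvLoopB : Nat → PySem.Dict String (List String) → PySem.Dict String Int → String → String
  | 0, _, _, node => node
  | fuel+1, adj, cnt, node =>
    if cnt.contains node && decide (0 < cnt.getD node 0) then
      let k := cnt.getD node 0 - 1
      match PySem.List.pyGet? (adj.getD node []) k with
      | none => node            -- unreachable: k is in range here
      | some nxt => pvLoopB fuel adj (cnt.insert node k) nxt
    else node

def find_last_dest_alt (original_click : List (List String)) (start : String) : Option String :=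
  if start = "" ∨ original_click = [] then none
  else some (pvLoopB (original_click.length + 1) (pvAdjB original_click)
               (pvCntB (pvAdjB original_click)) start)

-- ===== PRECONDITION & SPEC =====
-- Pre_ excludes exactly the inputs where Python A raises IndexError: a reachable
-- click with fewer than two entries (the guard returns None first when start is
-- empty or the list is empty, so those stay inside).
def Pre_find_last_dest (original_click : List (List String)) (start : String) : Prop :=
  start = "" ∨ original_click = [] ∨ ∀ click ∈ original_click, 2 ≤ click.length
instance (original_click : List (List String)) (start : String) : Decidable (Pre_find_last_dest original_click start) := by unfold Pre_find_last_dest; infer_instance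

def pvWitness_find_last_dest : List (List String) × String := ([["a", "b"], ["b", "c"]], "a")

def Spec_find_last_dest (original_click : List (List String)) (start : String) (out : Option String) : Prop := out = find_last_dest_alt original_click start
instance (original_click : List (List String)) (start : String) (out : Option String) : Decidable (Spec_find_last_dest original_click start out) := by unfold Spec_find_last_dest; infer_instance

-- ===== CLAIM (what is proved, stated in full; the proofs are below) =====
def Claim_equal_find_last_dest : Prop := ∀ (original_click : List (List String)) (start : String), Dom_find_last_dest original_click start → Pre_find_last_dest original_click start → Spec_find_last_dest original_click start (find_last_dest original_click start)

-- ===== LEMMAS AND PROOFS =====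

-- modify-with-append and setdefault-style insert build the same dictionary step
theorem pv_modify_eq_insert (d : PySem.Dict String (List String)) (k : String) (v : String) :
    d.modify k [] (fun l => l ++ [v]) = d.insert k (d.getD k [] ++ [v]) := rfl

theorem pv_adj_eq (original_click : List (List String)) :
    pvBuildAdjA original_click = pvAdjB original_click := by
  unfold pvBuildAdjA pvAdjB
  simp only [pv_modify_eq_insert]

theorem pv_adj_nodup (original_click : List (List String)) :
    (pvAdjB original_click).keys.Nodup := by
  unfold pvAdjB
  exact PySem.Dict.nodup_keys_foldl_insert_key original_click
    (fun click => PySem.List.pyGetD click 0 "")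
    (fun d click => d.getD (PySem.List.pyGetD click 0 "") [] ++ [PySem.List.pyGetD click 1 ""])
    PySem.Dict.empty PySem.Dict.nodup_keys_empty

theorem pv_cnt_items (adj : PySem.Dict String (List String)) (h : adj.keys.Nodup) :
    (pvCntB adj).items = adj.items.map (fun p => (p.1, (p.2.length : Int))) := by
  unfold pvCntB
  have := PySem.Dict.items_foldl_insert_fresh adj.items (fun p => p.1)
    (fun p => (p.2.length : Int)) PySem.Dict.empty
    (by intro a _; exact PySem.Dict.contains_empty _) h
  simpa using this

theorem pv_cnt_keys (adj : PySem.Dict String (List String)) (h : adj.keys.Nodup) :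
    (pvCntB adj).keys = adj.keys := by
  show ((pvCntB adj).items.map (fun p => p.1)) = (adj.items.map (fun p => p.1))
  rw [pv_cnt_items adj h, List.map_map]
  rfl

theorem pv_cnt_contains (adj : PySem.Dict String (List String)) (h : adj.keys.Nodup) (k : String) :
    (pvCntB adj).contains k = adj.contains k := by
  rw [PySem.Dict.contains_eq_decide_mem_keys, PySem.Dict.contains_eq_decide_mem_keys,
    pv_cnt_keys adj h]

theorem pv_cnt_getD (adj : PySem.Dict String (List String)) (h : adj.keys.Nodup) (k : String) :
    (pvCntB adj).getD k 0 = if adj.contains k then ((adj.getD k []).length : Int) else 0 := by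
  by_cases hc : adj.contains k = true
  · rw [if_pos hc]
    have hsome : (adj.get? k).isSome := by rw [← PySem.Dict.contains_eq_isSome_get?]; exact hc
    obtain ⟨v, hv⟩ := Option.isSome_iff_exists.mp hsome
    have hmem : (k, v) ∈ adj.items := PySem.Dict.mem_items_of_get?_eq_some adj hv
    have hmem' : (k, (v.length : Int)) ∈ (pvCntB adj).items := by
      rw [pv_cnt_items adj h]
      exact List.mem_map.mpr ⟨(k, v), hmem, rfl⟩
    have hnd' : (pvCntB adj).keys.Nodup := by rw [pv_cnt_keys adj h]; exact h
    rw [PySem.Dict.getD_of_mem_items _ hmem' hnd', PySem.Dict.getD_of_get?_eq_some _ _ hv]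
  · rw [if_neg hc]
    exact PySem.Dict.getD_of_not_contains _ _ (by rw [pv_cnt_contains adj h]; simpa using hc)

-- the simulation: A's mutated dict is always a take-prefix of B's fixed adjacency map
theorem pv_main (adj : PySem.Dict String (List String)) :
    ∀ (fuel : Nat) (dA : PySem.Dict String (List String)) (cnt : PySem.Dict String Int) (origin : String),
      (∀ k, dA.contains k = cnt.contains k) →
      (∀ k, 0 ≤ cnt.getD k 0 ∧ cnt.getD k 0 ≤ ((adj.getD k []).length : Int)) →
      (∀ k, dA.getD k [] = (adj.getD k []).take (cnt.getD k 0).toNat) →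
      pvDfsA fuel dA origin = pvLoopB fuel adj cnt origin := by
  intro fuel
  induction fuel with
  | zero => intro dA cnt origin _ _ _; rfl
  | succ n ih =>
    intro dA cnt origin h1 h2 h3
    by_cases hc : dA.contains origin = true
    · have hcnt : cnt.contains origin = true := by rw [← h1]; exact hc
      have hc0 : 0 ≤ cnt.getD origin 0 := (h2 origin).1
      have hcl : cnt.getD origin 0 ≤ ((adj.getD origin []).length : Int) := (h2 origin).2
      have hl : dA.getD origin [] =
          (adj.getD origin []).take (cnt.getD origin 0).toNat := h3 origin
      by_cases he : (adj.getD origin []).take (cnt.getD origin 0).toNat = []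
      · have hc00 : ¬ (0 < cnt.getD origin 0) := by
          intro hpos
          rcases List.take_eq_nil_iff.mp he with h0 | h0
          · omega
          · rw [h0] at hcl; simp at hcl; omega
        have hl' : dA.getD origin [] = [] := by rw [hl, he]
        simp [pvDfsA, pvLoopB, hc, hcnt, hl', hc00]
      · -- step case: A pops the last element of the prefix; B reads the same element by index
        have hm0 : (cnt.getD origin 0).toNat ≠ 0 :=
          fun h0 => he (List.take_eq_nil_iff.mpr (Or.inl h0))
        have hvne : adj.getD origin [] ≠ [] :=
          fun h0 => he (List.take_eq_nil_iff.mpr (Or.inr h0))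
        have hvpos : 0 < (adj.getD origin []).length := List.length_pos_of_ne_nil hvne
        have hlen : (cnt.getD origin 0).toNat ≤ (adj.getD origin []).length := by omega
        have hpos : 0 < cnt.getD origin 0 := by omega
        have hm1 : (cnt.getD origin 0).toNat - 1 < (adj.getD origin []).length := by omega
        have hllen : ((adj.getD origin []).take (cnt.getD origin 0).toNat).length =
            (cnt.getD origin 0).toNat := by
          rw [List.length_take]; omega
        have hlast : ((adj.getD origin []).take (cnt.getD origin 0).toNat).getLast he =
            (adj.getD origin [])[(cnt.getD origin 0).toNat - 1]'hm1 := by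
          rw [List.getLast_eq_getElem]
          simp only [List.getElem_take, hllen]
        have hdrop : ((adj.getD origin []).take (cnt.getD origin 0).toNat).dropLast =
            (adj.getD origin []).take ((cnt.getD origin 0).toNat - 1) := by
          rcases lt_or_eq_of_le hlen with hlt | heq
          · exact List.dropLast_take hlt
          · rw [heq, List.take_length, List.dropLast_eq_take]
        have hpop : PySem.List.pop? ((adj.getD origin []).take (cnt.getD origin 0).toNat) =
            some ((adj.getD origin [])[(cnt.getD origin 0).toNat - 1]'hm1,
                  (adj.getD origin []).take ((cnt.getD origin 0).toNat - 1)) := by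
          calc PySem.List.pop? ((adj.getD origin []).take (cnt.getD origin 0).toNat)
              = PySem.List.pop?
                  (((adj.getD origin []).take (cnt.getD origin 0).toNat).dropLast ++
                   [((adj.getD origin []).take (cnt.getD origin 0).toNat).getLast he]) := by
                rw [List.dropLast_append_getLast]
            _ = some (((adj.getD origin []).take (cnt.getD origin 0).toNat).getLast he,
                      ((adj.getD origin []).take (cnt.getD origin 0).toNat).dropLast) :=
                PySem.List.pop?_last _ _
            _ = _ := by rw [hlast, hdrop]
        have hcast : cnt.getD origin 0 - 1 = (((cnt.getD origin 0).toNat - 1 : Nat) : Int) := by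
          omega
        have hget : PySem.List.pyGet? (adj.getD origin []) (cnt.getD origin 0 - 1) =
            some ((adj.getD origin [])[(cnt.getD origin 0).toNat - 1]'hm1) := by
          rw [hcast, PySem.List.pyGet?_natCast, List.getElem?_eq_getElem hm1]
        rw [show pvDfsA (n+1) dA origin =
            pvDfsA n (dA.insert origin ((adj.getD origin []).take ((cnt.getD origin 0).toNat - 1)))
              ((adj.getD origin [])[(cnt.getD origin 0).toNat - 1]'hm1) from by
          simp [pvDfsA, hc, hl, he, hpop]]
        rw [show pvLoopB (n+1) adj cnt origin =
            pvLoopB n adj (cnt.insert origin (cnt.getD origin 0 - 1))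
              ((adj.getD origin [])[(cnt.getD origin 0).toNat - 1]'hm1) from by
          simp [pvLoopB, hcnt, hpos, hget]]
        apply ih
        · intro k
          rw [PySem.Dict.contains_insert, PySem.Dict.contains_insert, h1]
        · intro k
          rw [PySem.Dict.getD_insert]
          by_cases hk : k = origin
          · rw [if_pos hk, hk]
            constructor <;> omega
          · rw [if_neg hk]; exact h2 k
        · intro k
          rw [PySem.Dict.getD_insert, PySem.Dict.getD_insert]
          by_cases hk : k = origin
          · rw [if_pos hk, if_pos hk, hk]
            congr 1
            omega
          · rw [if_neg hk, if_neg hk]; exact h3 k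
    · have hcf : dA.contains origin = false := by simpa using hc
      have hcnt : cnt.contains origin = false := by rw [← h1]; exact hcf
      simp [pvDfsA, pvLoopB, hcf, hcnt]

-- ===== VERDICT (by name: the statement is the Claim_ definition above) =====
theorem find_last_dest_spec : Claim_equal_find_last_dest := by
  unfold Claim_equal_find_last_dest
  intro original_click start _ _
  unfold Spec_find_last_dest find_last_dest find_last_dest_alt
  by_cases hg : start = "" ∨ original_click = []
  · rw [if_pos hg, if_pos hg]
  · rw [if_neg hg, if_neg hg]
    congr 1
    rw [pv_adj_eq]
    have hnd := pv_adj_nodup original_click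
    apply pv_main
    · intro k; rw [pv_cnt_contains _ hnd]
    · intro k
      rw [pv_cnt_getD _ hnd]
      by_cases hck : (pvAdjB original_click).contains k = true
      · rw [if_pos hck]
        constructor
        · positivity
        · exact le_refl _
      · rw [if_neg hck]
        constructor
        · exact le_refl 0
        · positivity
    · intro k
      rw [pv_cnt_getD _ hnd]
      by_cases hck : (pvAdjB original_click).contains k = true
      · rw [if_pos hck]
        rw [Int.toNat_natCast, List.take_length]
      · rw [if_neg hck]
        rw [PySem.Dict.getD_of_not_contains _ _ (by simpa using hck)]
        simp
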